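-- pv_equiv track=rewrite | github.com/yangsooplus/CodingTestPython | Implementation/스위치켜고끄기.py | girl
-- ===== SOURCE A (Python) =====
-- def onoff(light, i):
--   if light[i] == '0':
--       light[i] = '1'
--   else:
--       light[i] = '0'
--
-- def girl(light, num):
--   onoff(light, num)
--   l = num-1
--   r = num+1
--   while l > -1 and r < len(light):
--     if light[l] == light[r]:
--       onoff(light, l)
--       onoff(light, r)
--       l -= 1
--       r += 1
--     else:
--       break
--   return light
-- ===== SOURCE B (Python) =====
-- def girl(light, num):
--     n = len(light)
--     # pass 1 (read-only): largest radius k with both mirror indices in range and equal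
--     k = 0
--     while num - (k + 1) >= 0 and num + (k + 1) < n and light[num - (k + 1)] == light[num + (k + 1)]:
--         k += 1
--     # pass 2: toggle every switch in the symmetric block around num
--     for i in range(num - k, num + k + 1):
--         light[i] = '1' if light[i] == '0' else '0'
--     return light
-- ===== Notes on version B (the rewrite author's own statement) =====
-- stated objective: alternative
-- what changed: A toggles while expanding outward in one read-write loop; B first computes the mirror radius k in a read-only pass over the unmodified list, then toggles the whole block [num-k, num+k] in a second pass.
import Mathlib
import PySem

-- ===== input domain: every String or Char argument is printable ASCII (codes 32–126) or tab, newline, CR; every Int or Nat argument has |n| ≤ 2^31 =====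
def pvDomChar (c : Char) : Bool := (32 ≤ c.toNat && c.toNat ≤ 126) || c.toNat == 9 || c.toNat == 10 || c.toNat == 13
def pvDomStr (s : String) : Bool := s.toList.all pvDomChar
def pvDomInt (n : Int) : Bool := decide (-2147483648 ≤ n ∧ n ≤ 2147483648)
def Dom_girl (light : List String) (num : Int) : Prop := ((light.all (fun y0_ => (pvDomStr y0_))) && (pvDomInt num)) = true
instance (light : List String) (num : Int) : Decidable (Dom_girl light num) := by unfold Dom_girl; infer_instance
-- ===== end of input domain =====

-- B changes the decomposition (read-only radius pass, then one toggling pass) — return value AND final list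
-- contents agree with A's in-place version; in Lean both ports are pure and return the updated list.

-- ===== PORT A =====
def pvOnoff (light : List String) (i : Int) : List String :=
  if PySem.List.pyGetD light i "" = "0" then PySem.List.pySetD light i "1"
  else PySem.List.pySetD light i "0"

-- A's while loop; fuel = length of the list always suffices (r strictly increases toward len)
def pvGirlLoop (fuel : Nat) (light : List String) (l r : Int) : List String :=
  match fuel with
  | 0 => light
  | fuel + 1 =>
    if l > -1 ∧ r < (light.length : Int) then
      if PySem.List.pyGetD light l "" = PySem.List.pyGetD light r "" then
        pvGirlLoop fuel (pvOnoff (pvOnoff light l) r) (l - 1) (r + 1)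
      else light
    else light

def girl (light : List String) (num : Int) : List String :=
  let light := pvOnoff light num
  pvGirlLoop light.length light (num - 1) (num + 1)

-- ===== PORT B =====
def pvTog (light : List String) (i : Int) : List String :=
  PySem.List.pySetD light i (if PySem.List.pyGetD light i "" = "0" then "1" else "0")

-- B's read-only radius loop; fuel = length of the list always suffices
def pvRadius (light : List String) (num : Int) (fuel : Nat) (k : Int) : Int :=
  match fuel with
  | 0 => k
  | fuel + 1 =>
    if num - (k + 1) ≥ 0 ∧ num + (k + 1) < (light.length : Int) ∧
        PySem.List.pyGetD light (num - (k + 1)) "" = PySem.List.pyGetD light (num + (k + 1)) "" then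
      pvRadius light num fuel (k + 1)
    else k

def girl_alt (light : List String) (num : Int) : List String :=
  let k := pvRadius light num light.length 0
  (PySem.List.pyRange (num - k) (num + k + 1) 1).foldl pvTog light

-- ===== PRECONDITION & SPEC =====
-- Pre_ excludes exactly the inputs where Python A raises IndexError: num out of range of the list.
def Pre_girl (light : List String) (num : Int) : Prop := PySem.Raise.InRange light.length num
instance (light : List String) (num : Int) : Decidable (Pre_girl light num) := by unfold Pre_girl; infer_instance
def pvWitness_girl : List String × Int := (["0", "1", "0"], 1)
def Spec_girl (light : List String) (num : Int) (out : List String) : Prop := out = girl_alt light num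
instance (light : List String) (num : Int) (out : List String) : Decidable (Spec_girl light num out) := by unfold Spec_girl; infer_instance

-- ===== CLAIM (what is proved, stated in full; the proofs are below) =====
def Claim_equal_girl : Prop := ∀ (light : List String) (num : Int), Dom_girl light num → Pre_girl light num → Spec_girl light num (girl light num)

-- ===== LEMMAS AND PROOFS =====

-- Nat-index toggle, proof-side
def togN (L : List String) (i : Nat) : List String :=
  L.set i (if L.getD i "" = "0" then "1" else "0")

-- the list with the symmetric block [c-j, c+j] toggled, built outward like A's loop
def bandN (L : List String) (c : Nat) : Nat → List String
  | 0 => togN L c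
  | j + 1 => togN (togN (bandN L c j) (c - (j + 1))) (c + (j + 1))

theorem length_togN (L : List String) (i : Nat) : (togN L i).length = L.length := by
  simp [togN]

theorem length_bandN (L : List String) (c : Nat) (j : Nat) : (bandN L c j).length = L.length := by
  induction j with
  | zero => simp [bandN, length_togN]
  | succ j ih => simp [bandN, length_togN, ih]

theorem getD_togN_ne (L : List String) (i j : Nat) (h : j ≠ i) :
    (togN L i).getD j "" = L.getD j "" := by
  simp [togN, List.getD_eq_getElem?_getD, List.getElem?_set_ne (Ne.symm h)]

theorem getD_bandN_outside (L : List String) (c j i : Nat)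
    (h : i + j < c ∨ c + j < i) : (bandN L c j).getD i "" = L.getD i "" := by
  induction j with
  | zero =>
    have : i ≠ c := by omega
    simpa [bandN] using getD_togN_ne L c i this
  | succ j ih =>
    have h1 : i ≠ c + (j + 1) := by omega
    have h2 : i ≠ c - (j + 1) := by omega
    have h3 : i + j < c ∨ c + j < i := by omega
    rw [bandN, getD_togN_ne _ _ _ h1, getD_togN_ne _ _ _ h2, ih h3]

theorem togN_comm (L : List String) (a b : Nat) (h : a ≠ b) :
    togN (togN L a) b = togN (togN L b) a := by
  simp only [togN, List.getD_eq_getElem?_getD, List.getElem?_set_ne h,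
    List.getElem?_set_ne (Ne.symm h)]
  exact List.set_comm _ _ h

theorem foldl_togN_pull (l : List Nat) (L : List String) (i : Nat) (h : ∀ j ∈ l, j ≠ i) :
    l.foldl togN (togN L i) = togN (l.foldl togN L) i := by
  induction l generalizing L with
  | nil => rfl
  | cons a t ih =>
    have ha : a ≠ i := h a (by simp)
    have ht : ∀ j ∈ t, j ≠ i := fun j hj => h j (by simp [hj])
    simp only [List.foldl_cons]
    rw [togN_comm L i a (Ne.symm ha), ih _ ht]

theorem pvTog_eq_togN (L : List String) (i : Int) (h : 0 ≤ i) :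
    pvTog L i = togN L i.toNat := by
  unfold pvTog togN
  rw [PySem.List.pySetD_of_nonneg _ _ h, PySem.List.pyGetD_of_nonneg _ _ h]

theorem pvOnoff_eq_togN (L : List String) (i : Int) (h : 0 ≤ i) :
    pvOnoff L i = togN L i.toNat := by
  unfold pvOnoff togN
  rw [PySem.List.pyGetD_of_nonneg _ _ h, PySem.List.pySetD_of_nonneg _ _ h,
    PySem.List.pySetD_of_nonneg _ _ h]
  split_ifs <;> rfl

-- B's Int-range fold is the Nat-range fold of togN
theorem foldl_pvTog_range (a len : Nat) (L : List String) :
    (PySem.List.pyRange (a : Int) ((a : Int) + (len : Nat)) 1).foldl pvTog L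
      = (List.range' a len).foldl togN L := by
  induction len generalizing a L with
  | zero => simp [PySem.List.pyRange_one_eq_nil]
  | succ len ih =>
    rw [PySem.List.pyRange_one_cons (by omega), List.range'_succ]
    simp only [List.foldl_cons]
    rw [pvTog_eq_togN L (a : Int) (by omega)]
    have e1 : ((a : Int) + 1) = ((a + 1 : Nat) : Int) := by push_cast; ring
    have e2 : ((a : Int) + ((len + 1 : Nat) : Int)) = ((a + 1 : Nat) : Int) + ((len : Nat) : Int) := by
      push_cast; ring
    simp only [Int.toNat_natCast, e1, e2]
    exact ih (a + 1) _

-- toggling the block [c-k, c+k] left to right equals building it outward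
theorem foldl_togN_eq_bandN (L : List String) (c k : Nat) (hk : k ≤ c) :
    (List.range' (c - k) (2 * k + 1)).foldl togN L = bandN L c k := by
  induction k with
  | zero => simp [bandN, List.range'_succ, togN]
  | succ k ih =>
    have hk' : k ≤ c := by omega
    have e2 : c - (k + 1) + 1 = c - k := by omega
    have e3 : c - k + 1 * (2 * k + 1) = c + k + 1 := by omega
    have hsplit : List.range' (c - (k + 1)) (2 * (k + 1) + 1)
        = (c - (k + 1)) :: (List.range' (c - k) (2 * k + 1) ++ [c + k + 1]) := by
      rw [show 2 * (k + 1) + 1 = ((2 * k + 1) + 1) + 1 from by ring, List.range'_succ, e2,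
        List.range'_concat, e3]
    rw [hsplit]
    simp only [List.foldl_cons, List.foldl_append, List.foldl_nil]
    rw [foldl_togN_pull _ _ _ (by intro j hj; rw [List.mem_range'_1] at hj; omega), ih hk']
    rfl

-- the synchronised induction: A's loop from radius j equals the band at B's final radius
theorem sync (L : List String) (c : Nat) :
    ∀ (fuel : Nat) (j : Nat), j ≤ c →
      pvGirlLoop fuel (bandN L c j) ((c : Int) - (j : Nat) - 1) ((c : Int) + (j : Nat) + 1)
        = bandN L c (pvRadius L (c : Int) fuel ((j : Nat) : Int)).toNat := by
  intro fuel
  induction fuel with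
  | zero => intro j hj; simp [pvGirlLoop, pvRadius]
  | succ fuel ih =>
    intro j hj
    rw [pvGirlLoop, pvRadius, length_bandN]
    by_cases hb : ((c : Int) - (j : Nat) - 1 > -1 ∧ (c : Int) + (j : Nat) + 1 < (L.length : Int))
    · rw [if_pos hb]
      have hl0 : (0 : Int) ≤ (c : Int) - (j : Nat) - 1 := by omega
      have hr0 : (0 : Int) ≤ (c : Int) + (j : Nat) + 1 := by omega
      have hlt : ((c : Int) - (j : Nat) - 1).toNat = c - (j + 1) := by omega
      have hrt : ((c : Int) + (j : Nat) + 1).toNat = c + (j + 1) := by omega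
      -- the two compared cells are outside the toggled band, so reads come from L itself
      have el : PySem.List.pyGetD (bandN L c j) ((c : Int) - (j : Nat) - 1) ""
          = L.getD (c - (j + 1)) "" := by
        rw [PySem.List.pyGetD_of_nonneg _ _ hl0, hlt]
        exact getD_bandN_outside L c j _ (Or.inl (by omega))
      have er : PySem.List.pyGetD (bandN L c j) ((c : Int) + (j : Nat) + 1) ""
          = L.getD (c + (j + 1)) "" := by
        rw [PySem.List.pyGetD_of_nonneg _ _ hr0, hrt]
        exact getD_bandN_outside L c j _ (Or.inr (by omega))
      have elL : PySem.List.pyGetD L ((c : Int) - (((j : Nat) : Int) + 1)) ""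
          = L.getD (c - (j + 1)) "" := by
        rw [PySem.List.pyGetD_of_nonneg _ _ (by omega)]
        have ht : ((c : Int) - (((j : Nat) : Int) + 1)).toNat = c - (j + 1) := by omega
        rw [ht]
      have erL : PySem.List.pyGetD L ((c : Int) + (((j : Nat) : Int) + 1)) ""
          = L.getD (c + (j + 1)) "" := by
        rw [PySem.List.pyGetD_of_nonneg _ _ (by omega)]
        have ht : ((c : Int) + (((j : Nat) : Int) + 1)).toNat = c + (j + 1) := by omega
        rw [ht]
      by_cases he : L.getD (c - (j + 1)) "" = L.getD (c + (j + 1)) ""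
      · rw [if_pos (by rw [el, er]; exact he),
            if_pos ⟨by omega, by omega, by rw [elL, erL]; exact he⟩]
        have stepEq : pvOnoff (pvOnoff (bandN L c j) ((c : Int) - (j : Nat) - 1)) ((c : Int) + (j : Nat) + 1)
            = bandN L c (j + 1) := by
          rw [pvOnoff_eq_togN _ _ hl0, hlt, pvOnoff_eq_togN _ _ (by omega), hrt]
          rfl
        rw [stepEq]
        have e6 : (c : Int) - (j : Nat) - 1 - 1 = (c : Int) - ((j + 1 : Nat) : Int) - 1 := by
          push_cast; ring
        have e7 : (c : Int) + (j : Nat) + 1 + 1 = (c : Int) + ((j + 1 : Nat) : Int) + 1 := by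
          push_cast; ring
        have e8 : ((j : Nat) : Int) + 1 = ((j + 1 : Nat) : Int) := by push_cast; ring
        rw [e6, e7, e8]
        exact ih (j + 1) (by omega)
      · rw [if_neg (by rw [el, er]; exact he),
            if_neg (by rintro ⟨-, -, h3⟩; rw [elL, erL] at h3; exact he h3)]
        simp
    · rw [if_neg hb, if_neg (by rintro ⟨h1, h2, -⟩; exact hb ⟨by omega, by omega⟩)]
      simp

-- bounds produced by B's radius loop
theorem pvRadius_bounds (L : List String) (num : Int) :
    ∀ (fuel : Nat) (j : Int), 0 ≤ j →
      j ≤ pvRadius L num fuel j ∧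
        (pvRadius L num fuel j = j ∨
          (num - pvRadius L num fuel j ≥ 0 ∧ num + pvRadius L num fuel j < (L.length : Int))) := by
  intro fuel
  induction fuel with
  | zero => intro j hj; simp [pvRadius]
  | succ fuel ih =>
    intro j hj
    rw [pvRadius]
    split_ifs with h
    · obtain ⟨h1, h2⟩ := ih (j + 1) (by omega)
      refine ⟨by omega, Or.inr ?_⟩
      rcases h2 with h2 | h2
      · rw [h2]; exact ⟨by omega, by omega⟩
      · exact h2
    · simp

theorem girl_loop_stop (fuel : Nat) (light : List String) (l r : Int) (h : ¬ (l > -1)) :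
    pvGirlLoop fuel light l r = light := by
  cases fuel with
  | zero => rfl
  | succ fuel => rw [pvGirlLoop, if_neg (by rintro ⟨h1, -⟩; exact h h1)]

theorem pvTog_eq_pvOnoff (L : List String) (i : Int) : pvTog L i = pvOnoff L i := by
  unfold pvTog pvOnoff
  split_ifs <;> rfl

-- ===== VERDICT (by name: the statement is the Claim_ definition above) =====
theorem girl_spec : Claim_equal_girl := by
  intro light num _hdom hpre
  unfold Spec_girl girl girl_alt
  show pvGirlLoop (pvOnoff light num).length (pvOnoff light num) (num - 1) (num + 1)
      = (PySem.List.pyRange (num - pvRadius light num light.length 0)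
          (num + pvRadius light num light.length 0 + 1) 1).foldl pvTog light
  obtain ⟨hlo, hhi⟩ : -(light.length : Int) ≤ num ∧ num < (light.length : Int) := hpre
  by_cases hneg : num < 0
  · -- negative index: A toggles only light[num]; B's radius is 0, so one toggle at num
    have hrad : pvRadius light num light.length 0 = 0 := by
      cases h : light.length with
      | zero => simp [pvRadius]
      | succ n => rw [pvRadius, if_neg (by rintro ⟨h1, -⟩; omega)]
    rw [girl_loop_stop _ _ _ _ (by omega), hrad]
    have hr : PySem.List.pyRange (num - 0) (num + 0 + 1) 1 = [num] := by
      rw [show num - 0 = num from by ring, show num + 0 + 1 = num + 1 from by ring]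
      exact PySem.List.pyRange_one_singleton num
    rw [hr]
    simp only [List.foldl_cons, List.foldl_nil]
    rw [pvTog_eq_pvOnoff]
  · -- nonnegative index: synchronised induction on the two loops
    have h0 : 0 ≤ num := by omega
    obtain ⟨c, rfl⟩ : ∃ c : Nat, num = (c : Int) := ⟨num.toNat, by omega⟩
    have hcn : c < light.length := by omega
    have hlenA : (pvOnoff light (c : Int)).length = light.length := by
      unfold pvOnoff
      split_ifs <;> simp [PySem.List.pySetD_of_nonneg _ _ h0]
    have hband0 : pvOnoff light (c : Int) = bandN light c 0 := by
      rw [pvOnoff_eq_togN _ _ h0]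
      simp [bandN]
    rw [hlenA, hband0]
    have e1 : (c : Int) - 1 = (c : Int) - ((0 : Nat) : Int) - 1 := by push_cast; ring
    have e2 : (c : Int) + 1 = (c : Int) + ((0 : Nat) : Int) + 1 := by push_cast; ring
    rw [e1, e2, sync light c light.length 0 (Nat.zero_le c)]
    simp only [Nat.cast_zero]
    set k := pvRadius light (c : Int) light.length 0 with hkdef
    obtain ⟨hk0, hkb⟩ := pvRadius_bounds light (c : Int) light.length 0 le_rfl
    rw [← hkdef] at hk0 hkb
    have hkc : k.toNat ≤ c := by
      rcases hkb with h | h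
      · omega
      · omega
    have ea : (c : Int) - k = ((c - k.toNat : Nat) : Int) := by omega
    have eb : (c : Int) + k + 1 = ((c - k.toNat : Nat) : Int) + ((2 * k.toNat + 1 : Nat) : Int) := by
      push_cast; omega
    rw [ea, eb, foldl_pvTog_range, foldl_togN_eq_bandN light c k.toNat hkc]
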